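-- pv_equiv track=rewrite | github.com/sjdallst/CarCode | Algorithm.py | filtersound
-- ===== SOURCE A (Python) =====
-- def filtersound(wavearray):
--     startindex = 0
--     for index,val in enumerate(wavearray):
--         if val != 0 and val != -1:
--             startindex = index
--             break
--     stopindex = 0
--     for index,val in reversed(list(enumerate(wavearray))):
--         if val != 128 and val != 127:
--             stopindex = index
--             break
--
--     return wavearray[startindex:stopindex+1]
-- ===== SOURCE B (Python) =====
-- def filtersound(wavearray):
--     found_start = False
--     startindex = 0
--     stopindex = 0
--     for index, val in enumerate(wavearray):
--         if not found_start and val != 0 and val != -1: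
--             startindex = index
--             found_start = True
--         if val != 127 and val != 128:
--             stopindex = index
--     return wavearray[startindex:stopindex + 1]
-- ===== Notes on version B (the rewrite author's own statement) =====
-- stated objective: alternative
-- what changed: Fused A's two scans (a forward break-loop for the start and a reversed break-loop for the stop) into one forward pass that records the first non-{0,-1} index via a found flag and overwrites the stop index at every non-{127,128} value, so it ends at the last such index.
import Mathlib
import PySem

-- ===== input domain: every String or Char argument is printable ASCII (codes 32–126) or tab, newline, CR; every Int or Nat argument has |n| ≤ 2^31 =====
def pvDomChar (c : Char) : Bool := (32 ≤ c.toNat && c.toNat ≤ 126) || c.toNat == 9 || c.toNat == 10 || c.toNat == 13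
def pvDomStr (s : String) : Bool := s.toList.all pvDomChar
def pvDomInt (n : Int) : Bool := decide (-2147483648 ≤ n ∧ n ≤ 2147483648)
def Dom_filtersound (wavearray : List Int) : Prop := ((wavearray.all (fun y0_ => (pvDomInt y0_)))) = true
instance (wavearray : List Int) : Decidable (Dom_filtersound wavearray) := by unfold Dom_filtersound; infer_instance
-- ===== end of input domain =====

-- B fuses A's two scans (forward break-loop for start, reversed break-loop for stop)
-- into one forward pass with a found-flag and last-match overwrite; same cost, different decomposition.


-- ===== PORT A =====
-- enumerate(wavearray) starting at index i (shared Python builtin)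
def pyEnum (xs : List Int) (i : Int) : List (Int × Int) :=
  match xs with
  | [] => []
  | v :: t => (i, v) :: pyEnum t (i + 1)

-- first loop: break at the first val ∉ {0,-1}, startindex defaults to 0
def aStart (xs : List Int) (i : Int) : Int :=
  match xs with
  | [] => 0
  | v :: t => if v ≠ 0 ∧ v ≠ -1 then i else aStart t (i + 1)

-- second loop: over reversed(list(enumerate(...))), break at first val ∉ {128,127}, default 0
def aStopScan (l : List (Int × Int)) : Int :=
  match l with
  | [] => 0
  | (i, v) :: t => if v ≠ 128 ∧ v ≠ 127 then i else aStopScan t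

def filtersound (wavearray : List Int) : List Int :=
  let startindex := aStart wavearray 0
  let stopindex := aStopScan (pyEnum wavearray 0).reverse
  PySem.List.slice wavearray (some startindex) (some (stopindex + 1))

-- ===== PORT B =====
-- single forward pass; state = (found_start, startindex, stopindex)
def bStep (st : Bool × Int × Int) (p : Int × Int) : Bool × Int × Int :=
  let (found, s, t) := st
  let (i, v) := p
  let st1 := if ¬found ∧ v ≠ 0 ∧ v ≠ -1 then (true, i) else (found, s)
  let t' := if v ≠ 127 ∧ v ≠ 128 then i else t
  (st1.1, st1.2, t')

def filtersound_alt (wavearray : List Int) : List Int :=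
  let r := (pyEnum wavearray 0).foldl bStep (false, 0, 0)
  PySem.List.slice wavearray (some r.2.1) (some (r.2.2 + 1))

-- ===== PRECONDITION & SPEC =====
def Spec_filtersound (wavearray : List Int) (out : List Int) : Prop := out = filtersound_alt wavearray
instance (wavearray : List Int) (out : List Int) : Decidable (Spec_filtersound wavearray out) := by unfold Spec_filtersound; infer_instance

-- ===== CLAIM (what is proved, stated in full; the proofs are below) =====
def Claim_equal_filtersound : Prop := ∀ (wavearray : List Int), Dom_filtersound wavearray → Spec_filtersound wavearray (filtersound wavearray)

-- ===== LEMMAS AND PROOFS =====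

-- once found, the found flag and start component never change
theorem bStep_found_fixed (l : List (Int × Int)) : ∀ (s t : Int),
    ∃ t', l.foldl bStep (true, s, t) = (true, s, t') := by
  induction l with
  | nil => intro s t; exact ⟨t, rfl⟩
  | cons p rest ih =>
    intro s t
    obtain ⟨i, v⟩ := p
    have h : bStep (true, s, t) (i, v) = (true, s, if v ≠ 127 ∧ v ≠ 128 then i else t) := by
      simp [bStep]
    rw [List.foldl_cons, h]
    exact ih s _

-- the start component of B's fold equals A's first-loop result
theorem start_eq (xs : List Int) : ∀ (i t0 : Int),
    ((pyEnum xs i).foldl bStep (false, 0, t0)).2.1 = aStart xs i := by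
  induction xs with
  | nil => intro i t0; simp [pyEnum, aStart]
  | cons v rest ih =>
    intro i t0
    by_cases hs : v ≠ 0 ∧ v ≠ -1
    · obtain ⟨t', ht⟩ := bStep_found_fixed (pyEnum rest (i + 1)) i
        (if v ≠ 127 ∧ v ≠ 128 then i else t0)
      simp [pyEnum, aStart, bStep, hs, ht]
    · simp [pyEnum, aStart, bStep, hs, ih]

-- A's reversed-scan default conjugation: scanning a ++ b = scan a with default (scan b)
def aStopScanD (l : List (Int × Int)) (d : Int) : Int :=
  match l with
  | [] => d
  | (i, v) :: t => if v ≠ 128 ∧ v ≠ 127 then i else aStopScanD t d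

theorem aStopScanD_append (a b : List (Int × Int)) (d : Int) :
    aStopScanD (a ++ b) d = aStopScanD a (aStopScanD b d) := by
  induction a with
  | nil => simp [aStopScanD]
  | cons p t ih =>
    obtain ⟨i, v⟩ := p
    simp only [List.cons_append, aStopScanD]
    split <;> simp [ih]

theorem aStopScan_eq_D (l : List (Int × Int)) : aStopScan l = aStopScanD l 0 := by
  induction l with
  | nil => rfl
  | cons p t ih => obtain ⟨i, v⟩ := p; simp only [aStopScan, aStopScanD]; split <;> simp [ih]

-- the stop component of B's fold equals the reversed scan with the initial stop as default
theorem stop_eq (l : List (Int × Int)) : ∀ (st : Bool × Int × Int),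
    (l.foldl bStep st).2.2 = aStopScanD l.reverse st.2.2 := by
  induction l with
  | nil => intro st; simp [aStopScanD]
  | cons p rest ih =>
    intro st
    obtain ⟨i, v⟩ := p
    obtain ⟨found, s, t⟩ := st
    simp only [List.foldl, List.reverse_cons, aStopScanD_append, ih]
    have : aStopScanD [(i, v)] t = (bStep (found, s, t) (i, v)).2.2 := by
      simp only [aStopScanD, bStep]
      by_cases hv : v ≠ 128 ∧ v ≠ 127
      · have hv' : v ≠ 127 ∧ v ≠ 128 := ⟨hv.2, hv.1⟩
        simp only [if_pos hv, if_pos hv']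
      · have hv' : ¬(v ≠ 127 ∧ v ≠ 128) := by tauto
        simp only [if_neg hv, if_neg hv']
    rw [this]

-- ===== VERDICT (by name: the statement is the Claim_ definition above) =====
theorem filtersound_spec : Claim_equal_filtersound := by
  intro wavearray _
  unfold Spec_filtersound
  simp only [filtersound, filtersound_alt]
  rw [start_eq, stop_eq, ← aStopScan_eq_D]
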